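-- pv_equiv track=rewrite | github.com/XavierXASS/https-github.com-XavierXASS-auditor-contable | ocr_client.py | make_sequential_ranges
-- ===== SOURCE A (Python) =====
-- from typing import List, Dict, Optional, Tuple, Any
--
-- def make_sequential_ranges(total_pages: int, chunk_size: int) -> List[Tuple[int, int]]:
--     ranges = []
--     p = 1
--     while p <= total_pages:
--         q = min(p + chunk_size - 1, total_pages)
--         ranges.append((p, q))
--         p = q + 1
--     return ranges
-- ===== SOURCE B (Python) =====
-- def make_sequential_ranges(total_pages, chunk_size):
--     if total_pages <= 0:
--         return []
--     n = (total_pages + chunk_size - 1) // chunk_size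
--     return [(1 + i * chunk_size, min((i + 1) * chunk_size, total_pages))
--             for i in range(n)]
-- ===== Notes on version B (the rewrite author's own statement) =====
-- stated objective: alternative
-- what changed: Replaces the cursor-threading while loop with ceiling division for the chunk count and closed-form index arithmetic per chunk; Pre_ excludes chunk_size <= 0 with total_pages >= 1, where A loops forever.
-- outside the precondition, e.g. on make_sequential_ranges(5, 0): A does not finish within the time limit, B raises ZeroDivisionError; on make_sequential_ranges(5, -2): A does not finish within the time limit, B returns []
import Mathlib
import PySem

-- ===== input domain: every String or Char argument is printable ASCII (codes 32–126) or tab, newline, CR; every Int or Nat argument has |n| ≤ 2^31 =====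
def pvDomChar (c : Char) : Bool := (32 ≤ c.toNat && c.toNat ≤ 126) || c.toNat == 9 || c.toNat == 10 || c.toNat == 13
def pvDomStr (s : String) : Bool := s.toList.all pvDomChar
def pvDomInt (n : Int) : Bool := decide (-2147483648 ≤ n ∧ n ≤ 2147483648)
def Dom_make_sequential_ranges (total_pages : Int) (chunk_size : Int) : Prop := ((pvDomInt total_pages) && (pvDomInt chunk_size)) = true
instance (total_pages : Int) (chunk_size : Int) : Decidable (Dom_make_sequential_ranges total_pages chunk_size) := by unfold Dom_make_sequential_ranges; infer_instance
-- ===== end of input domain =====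

-- B replaces A's cursor-threading while loop with ceiling division for the chunk count
-- and closed-form index arithmetic per chunk (alternative decomposition, same cost).
-- ===== PORT A =====
-- while loop ported as fuel recursion; fuel total_pages.toNat suffices because with
-- chunk_size >= 1 (Pre_) p advances by at least 1 each iteration starting from 1.
def pvLoopA (total cs : Int) : Nat → Int → List (Int × Int)
  | 0, _ => []
  | f + 1, p =>
    if p ≤ total then
      let q := min (p + cs - 1) total
      (p, q) :: pvLoopA total cs f (q + 1)
    else []

def make_sequential_ranges (total_pages : Int) (chunk_size : Int) : List (Int × Int) :=
  pvLoopA total_pages chunk_size total_pages.toNat 1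

-- ===== PORT B =====
def make_sequential_ranges_alt (total_pages : Int) (chunk_size : Int) : List (Int × Int) :=
  if total_pages ≤ 0 then []
  else
    let n := PySem.Int.floordiv (total_pages + chunk_size - 1) chunk_size
    (PySem.List.pyRange 0 n 1).map
      (fun i => (1 + i * chunk_size, min ((i + 1) * chunk_size) total_pages))

-- ===== PRECONDITION & SPEC =====
-- Pre_ excludes chunk_size <= 0 with total_pages >= 1: there A's while loop never
-- terminates (the cursor does not advance), so A returns on exactly the inputs in Pre_.
def Pre_make_sequential_ranges (total_pages : Int) (chunk_size : Int) : Prop :=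
  1 ≤ chunk_size ∨ total_pages ≤ 0
instance (total_pages : Int) (chunk_size : Int) : Decidable (Pre_make_sequential_ranges total_pages chunk_size) := by unfold Pre_make_sequential_ranges; infer_instance
def pvWitness_make_sequential_ranges : Int × Int := (10, 3)

def Spec_make_sequential_ranges (total_pages : Int) (chunk_size : Int) (out : List (Int × Int)) : Prop := out = make_sequential_ranges_alt total_pages chunk_size
instance (total_pages : Int) (chunk_size : Int) (out : List (Int × Int)) : Decidable (Spec_make_sequential_ranges total_pages chunk_size out) := by unfold Spec_make_sequential_ranges; infer_instance

-- ===== CLAIM (what is proved, stated in full; the proofs are below) =====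
def Claim_equal_make_sequential_ranges : Prop := ∀ (total_pages : Int) (chunk_size : Int), Dom_make_sequential_ranges total_pages chunk_size → Pre_make_sequential_ranges total_pages chunk_size → Spec_make_sequential_ranges total_pages chunk_size (make_sequential_ranges total_pages chunk_size)

-- ===== LEMMAS AND PROOFS =====

-- ceiling-division brackets for n = (total + cs - 1) // cs with cs > 0
lemma pv_ceil_bounds (total cs : Int) (hcs : 1 ≤ cs) :
    total ≤ PySem.Int.floordiv (total + cs - 1) cs * cs ∧
    (PySem.Int.floordiv (total + cs - 1) cs - 1) * cs ≤ total - 1 := by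
  set n := PySem.Int.floordiv (total + cs - 1) cs with hn
  have h := (PySem.Int.floordiv_eq_iff_of_pos (a := total + cs - 1) (b := cs) (q := n)
    (by omega)).mp hn.symm
  constructor
  · nlinarith [h.2]
  · nlinarith [h.1]

lemma pv_loop_eq (total cs : Int) (hcs : 1 ≤ cs) (htot : 1 ≤ total) :
    ∀ (j : Nat) (k : Int) (fuel : Nat), 0 ≤ k →
      k + (j : Int) = PySem.Int.floordiv (total + cs - 1) cs → (j : Int) ≤ (fuel : Int) →
      pvLoopA total cs fuel (1 + k * cs) =
        (PySem.List.pyRange k (PySem.Int.floordiv (total + cs - 1) cs) 1).map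
          (fun i => (1 + i * cs, min ((i + 1) * cs) total)) := by
  set n := PySem.Int.floordiv (total + cs - 1) cs with hn
  obtain ⟨hub, hlb⟩ := pv_ceil_bounds total cs hcs
  intro j
  induction j with
  | zero =>
    intro k fuel hk hkn _
    have hkn' : k = n := by omega
    have hub' : total ≤ k * cs := by rw [hkn']; exact hub
    rw [hkn', PySem.List.pyRange_one_eq_nil (le_refl n), List.map_nil]
    rw [← hkn']
    cases fuel with
    | zero => rfl
    | succ f =>
      have hc : ¬ (1 + k * cs ≤ total) := by omega
      simp [pvLoopA, hc]
  | succ j ih =>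
    intro k fuel hk hkn hfuel
    have hklt : k < n := by push_cast at hkn ⊢; omega
    have hkub : k * cs ≤ total - 1 := by
      calc k * cs ≤ (n - 1) * cs := by nlinarith
        _ ≤ total - 1 := hlb
    cases fuel with
    | zero => exfalso; push_cast at hfuel; omega
    | succ f =>
      have hcond : 1 + k * cs ≤ total := by omega
      rw [PySem.List.pyRange_one_cons hklt, List.map_cons]
      show (if 1 + k * cs ≤ total then
          (1 + k * cs, min (1 + k * cs + cs - 1) total) ::
            pvLoopA total cs f (min (1 + k * cs + cs - 1) total + 1)
        else []) = _
      rw [if_pos hcond]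
      have harith : 1 + k * cs + cs - 1 = (k + 1) * cs := by ring
      rw [harith]
      by_cases hq : (k + 1) * cs ≤ total
      · have hmin : min ((k + 1) * cs) total = (k + 1) * cs := min_eq_left hq
        rw [hmin]
        have htail : (k + 1) * cs + 1 = 1 + (k + 1) * cs := by ring
        rw [htail, ih (k + 1) f (by omega) (by push_cast at hkn ⊢; omega)
          (by push_cast at hfuel ⊢; omega)]
      · have hk1n : k + 1 = n := by
          by_contra hne
          have hk1lt : k + 1 < n := by omega
          have : (k + 1) * cs ≤ (n - 1) * cs := by nlinarith
          linarith
        have hj0 : (j : Int) = 0 := by omega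
        have hmin : min ((k + 1) * cs) total = total := min_eq_right (by omega)
        rw [hmin, hk1n, PySem.List.pyRange_one_eq_nil (le_refl n), List.map_nil]
        cases f with
        | zero => rfl
        | succ f' => simp [pvLoopA]

-- ===== VERDICT (by name: the statement is the Claim_ definition above) =====
theorem make_sequential_ranges_spec : Claim_equal_make_sequential_ranges := by
  intro total cs _ hpre
  unfold Spec_make_sequential_ranges make_sequential_ranges make_sequential_ranges_alt
  by_cases htot : total ≤ 0
  · rw [if_pos htot]
    have : total.toNat = 0 := by omega
    rw [this]; rfl
  · rw [if_neg htot]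
    have htot1 : 1 ≤ total := by omega
    have hcs : 1 ≤ cs := by
      rcases hpre with h | h
      · exact h
      · omega
    obtain ⟨hub, hlb⟩ := pv_ceil_bounds total cs hcs
    set n := PySem.Int.floordiv (total + cs - 1) cs with hn
    have hn1 : 1 ≤ n := by nlinarith
    have hnle : n ≤ total := by nlinarith
    conv_lhs => rw [show (1 : Int) = 1 + 0 * cs from by ring]
    rw [pv_loop_eq total cs hcs htot1 n.toNat 0 total.toNat (le_refl 0)
      (by omega) (by omega)]
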